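-- pv_equiv track=rewrite | github.com/koushikkatakam/library | lc_programs/codes.py | lc_2315
-- ===== SOURCE A (Python) =====
-- def lc_2315(s):
--       """
--       Counts the number of '*' characters in s, excluding those between pairs of '|'.
--
--       Parameters:
--           s (str): Input string containing substrings separated by '|'.
--
--       Returns:
--           int: Number of '*' characters excluding those between '|' pairs.
--
--       Example:
--           Input: s = "l|*e*et|c**o|*de|"
--           Output: 2
--       """
--
--       ls=[] # Initialize an empty list to store counts of '*' characters.
--       k=[] # Initialize an empty list to store substring counts of '*' characters.
--       s=s.split('|') # Split the input string by '|' characters.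
--       for i in range(len(s)):  # Iterate through the substrings.
--           if i%2==0: # Check if the index is even (outside '|' pairs).
--               k.append(s[i].count('*')) # Count the number of '*' characters in the substring and append to the list.
--       return sum(k) # Return the sum of counts of '*' characters.
-- ===== SOURCE B (Python) =====
-- def lc_2315(s):
--     count = 0
--     inside = False
--     for ch in s:
--         if ch == '|':
--             inside = not inside
--         elif ch == '*' and not inside:
--             count += 1
--     return count
-- ===== Notes on version B (the rewrite author's own statement) =====
-- stated objective: simpler
-- what changed: Replaces splitting on the bar separator and summing star-counts of even-indexed pieces with a single character pass keeping a boolean inside-bars flag and a running count.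
import Mathlib
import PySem

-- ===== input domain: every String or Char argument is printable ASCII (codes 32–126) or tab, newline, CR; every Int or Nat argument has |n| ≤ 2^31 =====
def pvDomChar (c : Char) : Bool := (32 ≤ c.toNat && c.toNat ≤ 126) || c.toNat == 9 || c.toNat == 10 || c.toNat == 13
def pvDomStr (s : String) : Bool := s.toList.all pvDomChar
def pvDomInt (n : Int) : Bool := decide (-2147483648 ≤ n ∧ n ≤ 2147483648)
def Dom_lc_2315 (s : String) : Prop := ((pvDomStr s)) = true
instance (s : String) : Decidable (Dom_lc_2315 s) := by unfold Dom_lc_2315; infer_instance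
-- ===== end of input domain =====

-- B replaces A's split-on-'|'-and-sum-even-pieces with a single pass keeping an inside-bars flag (simpler; same cost).

-- ===== PORT A =====
-- s.split('|') always succeeds (separator nonempty); s[i] is always in range, .getD supplies an unreachable default
def lc_2315 (s : String) : Int :=
  let parts := (PySem.Str.split? s "|").getD []
  let k : List Int := (PySem.List.pyRange 0 (parts.length : Int)).foldl
    (fun k i =>
      if i % 2 == 0 then
        k ++ [((PySem.Str.count ((PySem.List.pyGet? parts i).getD "") "*" : Nat) : Int)]
      else k) []
  k.sum

-- ===== PORT B =====
def stepB (st : Int × Bool) (ch : Char) : Int × Bool :=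
  if ch = '|' then (st.1, !st.2)
  else if ch = '*' && !st.2 then (st.1 + 1, st.2)
  else st

def lc_2315_alt (s : String) : Int :=
  (s.toList.foldl stepB ((0 : Int), false)).1

-- ===== PRECONDITION & SPEC =====
def Spec_lc_2315 (s : String) (out : Int) : Prop := out = lc_2315_alt s
instance (s : String) (out : Int) : Decidable (Spec_lc_2315 s out) := by unfold Spec_lc_2315; infer_instance

-- ===== CLAIM (what is proved, stated in full; the proofs are below) =====
def Claim_equal_lc_2315 : Prop := ∀ (s : String), Dom_lc_2315 s → Spec_lc_2315 s (lc_2315 s)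

-- ===== LEMMAS AND PROOFS =====

-- clean single-char split recursion
def splitBar : List Char → List Char → List (List Char)
  | [], cur => [cur.reverse]
  | d :: rest, cur => if d = '|' then cur.reverse :: splitBar rest [] else splitBar rest (d :: cur)

-- B's state machine as a plain recursion
def goB : List Char → Bool → Int
  | [], _ => 0
  | c :: r, inside =>
      if c = '|' then goB r (!inside)
      else (if c = '*' && !inside then 1 else 0) + goB r inside

-- alternating sums of '*'-counts over the pieces
mutual
def sumEven : List (List Char) → Int
  | [] => 0
  | p :: r => ((p.countP (· == '*') : Nat) : Int) + sumOdd r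
def sumOdd : List (List Char) → Int
  | [] => 0
  | _ :: r => sumEven r
end

lemma splitOn_go_bar (l : List Char) : ∀ (fuel : Nat) (cur : List Char) (acc : List (List Char)),
    l.length ≤ fuel →
    PySem.Chars.splitOn.go ['|'] fuel l cur acc = acc.reverse ++ splitBar l cur := by
  induction l with
  | nil =>
    intro fuel cur acc _
    cases fuel <;> simp [PySem.Chars.splitOn.go, splitBar]
  | cons c rest ih =>
    intro fuel cur acc hf
    cases fuel with
    | zero => simp at hf
    | succ f =>
      simp only [List.length_cons] at hf
      by_cases hc : c = '|'
      · subst hc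
        rw [show PySem.Chars.splitOn.go ['|'] (f+1) ('|' :: rest) cur acc
              = PySem.Chars.splitOn.go ['|'] f rest [] (cur.reverse :: acc) by
            simp [PySem.Chars.splitOn.go, List.isPrefixOf]]
        rw [ih f [] (cur.reverse :: acc) (by omega)]
        simp [splitBar]
      · rw [show PySem.Chars.splitOn.go ['|'] (f+1) (c :: rest) cur acc
              = PySem.Chars.splitOn.go ['|'] f rest (c :: cur) acc by
            simp [PySem.Chars.splitOn.go, List.isPrefixOf, Ne.symm hc]]
        rw [ih f (c :: cur) acc (by omega)]
        simp [splitBar, hc]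

lemma splitOn_bar (l : List Char) : PySem.Chars.splitOn l ['|'] = splitBar l [] := by
  rw [PySem.Chars.splitOn, splitOn_go_bar l (l.length + 1) [] [] (by omega)]
  simp

lemma count_go_star (l : List Char) : ∀ (fuel acc : Nat), l.length ≤ fuel →
    PySem.Chars.count.go ['*'] fuel l acc = acc + l.countP (· == '*') := by
  induction l with
  | nil => intro fuel acc _; cases fuel <;> simp [PySem.Chars.count.go]
  | cons c rest ih =>
    intro fuel acc hf
    cases fuel with
    | zero => simp at hf
    | succ f =>
      simp only [List.length_cons] at hf
      by_cases hc : c = '*'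
      · subst hc
        rw [show PySem.Chars.count.go ['*'] (f+1) ('*' :: rest) acc
              = PySem.Chars.count.go ['*'] f rest (acc + 1) by
            simp [PySem.Chars.count.go, List.isPrefixOf]]
        rw [ih f (acc + 1) (by omega)]
        simp [List.countP_cons]
        omega
      · rw [show PySem.Chars.count.go ['*'] (f+1) (c :: rest) acc
              = PySem.Chars.count.go ['*'] f rest acc by
            simp [PySem.Chars.count.go, List.isPrefixOf, Ne.symm hc]]
        rw [ih f acc (by omega)]
        simp [List.countP_cons, hc]

lemma count_star (l : List Char) : PySem.Chars.count l ['*'] = l.countP (· == '*') := by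
  rw [PySem.Chars.count]
  simp [count_go_star l l.length 0 (le_refl _)]

lemma foldB (l : List Char) : ∀ (cnt : Int) (inside : Bool),
    (l.foldl stepB (cnt, inside)).1 = cnt + goB l inside := by
  induction l with
  | nil => intro cnt inside; simp [goB]
  | cons c rest ih =>
    intro cnt inside
    rw [List.foldl_cons]
    by_cases hc : c = '|'
    · rw [show stepB (cnt, inside) c = (cnt, !inside) by simp [stepB, hc], ih]
      simp [goB, hc]
    · by_cases hs : (decide (c = '*') && !inside) = true
      · rw [show stepB (cnt, inside) c = (cnt + 1, inside) by
          unfold stepB; rw [if_neg hc, if_pos hs], ih]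
        simp [goB, hc, hs]
        ring
      · rw [show stepB (cnt, inside) c = (cnt, inside) by
          unfold stepB; rw [if_neg hc, if_neg hs], ih]
        simp [goB, hc, hs]

lemma sum_splitBar (l : List Char) : ∀ (cur : List Char),
    sumEven (splitBar l cur) = ((cur.countP (· == '*') : Nat) : Int) + goB l false
    ∧ sumOdd (splitBar l cur) = goB l true := by
  induction l with
  | nil =>
    intro cur
    simp [splitBar, sumEven, sumOdd, goB]
  | cons c rest ih =>
    intro cur
    by_cases hc : c = '|'
    · subst hc
      simp only [splitBar, if_pos rfl, sumEven, sumOdd, goB, if_true, decide_true, decide_false]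
      constructor
      · rw [(ih []).2]; simp [goB]
      · rw [(ih []).1]; simp [goB]
    · simp only [splitBar, if_neg hc, goB, hc, if_true, if_false]
      constructor
      · rw [(ih (c :: cur)).1]
        by_cases hs : c = '*' <;> simp [List.countP_cons, hs] <;> push_cast <;> ring
      · rw [(ih (c :: cur)).2]
        simp [hc]

-- the even/odd alternating sum, on String pieces, as A's loop produces it
mutual
def sumEvenS : List String → Int
  | [] => 0
  | p :: r => ((PySem.Str.count p "*" : Nat) : Int) + sumOddS r
def sumOddS : List String → Int
  | [] => 0
  | _ :: r => sumEvenS r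
end

lemma sumEvenS_map (parts : List String) :
    sumEvenS parts = sumEven (parts.map String.toList)
    ∧ sumOddS parts = sumOdd (parts.map String.toList) := by
  induction parts with
  | nil => simp [sumEvenS, sumOddS, sumEven, sumOdd]
  | cons p r ih =>
    simp [sumEvenS, sumOddS, sumEven, sumOdd, ih.1, ih.2, PySem.Str.count_eq, count_star]

lemma foldA (parts : List String) : ∀ (len j : Nat) (k0 : List Int), j + len = parts.length →
    ((PySem.List.pyRange (j : Int) (parts.length : Int)).foldl
      (fun k i =>
        if i % 2 == 0 then
          k ++ [((PySem.Str.count ((PySem.List.pyGet? parts i).getD "") "*" : Nat) : Int)]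
        else k) k0).sum
    = k0.sum + (if j % 2 = 0 then sumEvenS (parts.drop j) else sumOddS (parts.drop j)) := by
  intro len
  induction len with
  | zero =>
    intro j k0 hj
    have hj' : j = parts.length := by omega
    subst hj'
    rw [show PySem.List.pyRange (parts.length : Int) (parts.length : Int) = [] by
      simp [PySem.List.pyRange]]
    simp [sumEvenS, sumOddS]
  | succ n ih =>
    intro j k0 hj
    have hlt : (j : Int) < (parts.length : Int) := by exact_mod_cast (by omega : j < parts.length)
    rw [PySem.List.pyRange_one_cons hlt]
    have hjl : j < parts.length := by omega
    have hget : PySem.List.pyGet? parts ((j : Nat) : Int) = some (parts[j]) := by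
      rw [PySem.List.pyGet?_natCast]; simp [hjl]
    have hdrop : parts.drop j = parts[j] :: parts.drop (j + 1) :=
      List.drop_eq_getElem_cons hjl
    have hcast : ((j : Int) + 1) = ((j + 1 : Nat) : Int) := by push_cast; ring
    by_cases hp : j % 2 = 0
    · have hm : ((j : Int) % 2 == 0) = true := by
        simp; omega
      simp only [List.foldl_cons, hm, hget, Option.getD_some]
      rw [hcast, ih (j + 1) _ (by omega)]
      have hp1 : ¬ (j + 1) % 2 = 0 := by omega
      rw [if_neg hp1, if_pos hp, hdrop, sumEvenS]
      simp [List.sum_append]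
      ring
    · have hm : ((j : Int) % 2 == 0) = false := by
        simp; omega
      simp only [List.foldl_cons, hm, Bool.false_eq_true, if_false]
      rw [hcast, ih (j + 1) _ (by omega)]
      have hp1 : (j + 1) % 2 = 0 := by omega
      rw [if_pos hp1, if_neg hp, hdrop, sumOddS]

lemma split_toList (s : String) :
    ∃ parts : List String, PySem.Str.split? s "|" = some parts
      ∧ parts.map String.toList = splitBar s.toList [] := by
  have h := PySem.Str.split?_map s "|"
  rw [show ("|" : String).toList = ['|'] from rfl] at h
  rw [PySem.Chars.split?] at h
  simp only [List.isEmpty_cons, Bool.false_eq_true, if_false] at h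
  cases he : PySem.Str.split? s "|" with
  | none => rw [he] at h; simp at h
  | some parts =>
    rw [he] at h
    simp only [Option.map_some, Option.some.injEq] at h
    exact ⟨parts, rfl, by rw [h, splitOn_bar]⟩

-- ===== VERDICT (by name: the statement is the Claim_ definition above) =====
theorem lc_2315_spec : Claim_equal_lc_2315 := by
  intro s _
  unfold Spec_lc_2315 lc_2315 lc_2315_alt
  obtain ⟨parts, hsplit, hmap⟩ := split_toList s
  rw [hsplit]
  simp only [Option.getD_some]
  have hA := foldA parts parts.length 0 [] (by omega)
  rw [show ((0 : Nat) : Int) = (0 : Int) by rfl] at hA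
  rw [hA]
  simp only [List.drop_zero, List.sum_nil, Nat.zero_mod, zero_add]
  rw [(sumEvenS_map parts).1, hmap, (sum_splitBar s.toList []).1, foldB]
  simp
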